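-- pv_equiv track=rewrite | github.com/pypi-data/pypi-mirror-67 | packages/acenv/acenv-0.1.4.tar.gz/acenv-0.1.4/acenv/ex/ex.py | parse_double_brackets
-- ===== SOURCE A (Python) =====
-- def parse_double_brackets(text):
--     refined = ''
--     for p, ch in enumerate(text):
--         try:
--             refined += ch
--             if ch == '(' and text[p + 1] == '(':
--                 refined += '0+'
--             elif ch == ')' and text[p + 1] == ')':
--                 refined += '+0'
--         except IndexError:
--             continue
--     return refined
-- ===== SOURCE B (Python) =====
-- def parse_double_brackets(text):
--     # Run-length strategy: split the text into maximal runs of equal characters;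
--     # a run of k '(' yields '(0+'*(k-1)+'(', a run of k ')' yields ')+0'*(k-1)+')',
--     # any other run is copied verbatim.
--     out = []
--     i, n = 0, len(text)
--     while i < n:
--         ch = text[i]
--         j = i + 1
--         while j < n and text[j] == ch:
--             j += 1
--         k = j - i
--         if ch == '(':
--             out.append('(0+' * (k - 1) + '(')
--         elif ch == ')':
--             out.append(')+0' * (k - 1) + ')')
--         else:
--             out.append(ch * k)
--         i = j
--     return ''.join(out)
-- ===== Notes on version B (the rewrite author's own statement) =====
-- stated objective: alternative
-- what changed: Replaces A's per-character lookahead loop with try/except by a run-length decomposition: the text is cut into maximal runs of equal characters and each run of k opening or closing parens is rendered in one step via string repetition of the three-character paren-plus-insertion block, other runs copied verbatim.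
import Mathlib
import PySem

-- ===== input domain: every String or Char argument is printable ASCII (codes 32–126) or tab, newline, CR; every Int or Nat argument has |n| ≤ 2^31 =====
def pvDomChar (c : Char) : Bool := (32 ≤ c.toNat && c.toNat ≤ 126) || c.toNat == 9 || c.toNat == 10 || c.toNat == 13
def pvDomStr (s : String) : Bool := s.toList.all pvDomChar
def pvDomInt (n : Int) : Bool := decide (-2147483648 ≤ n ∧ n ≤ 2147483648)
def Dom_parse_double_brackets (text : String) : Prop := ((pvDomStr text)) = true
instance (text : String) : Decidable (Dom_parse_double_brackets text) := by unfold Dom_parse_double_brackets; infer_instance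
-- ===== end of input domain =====

-- B replaces A's per-character lookahead loop (try/except) by a run-length decomposition
-- of the text into maximal runs of equal characters, rendering each paren run at once.

-- ===== PORT A =====
-- literal port of A: fold over enumerate(text), accumulator 'refined'; text[p+1] is
-- pyGet? into the whole text (none = IndexError → 'continue'; the char was already appended)
def pvStepA (L : List Char) (refined : List Char) (pch : Int × Char) : List Char :=
  let refined := refined ++ [pch.2]
  if pch.2 == '(' then
    match PySem.List.pyGet? L (pch.1 + 1) with
    | some c => if c == '(' then refined ++ ['0', '+'] else refined
    | none => refined
  else if pch.2 == ')' then
    match PySem.List.pyGet? L (pch.1 + 1) with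
    | some c => if c == ')' then refined ++ ['+', '0'] else refined
    | none => refined
  else refined

def parse_double_brackets (text : String) : String :=
  String.ofList ((PySem.List.enumerate text.toList 0).foldl (pvStepA text.toList) [])

-- ===== PORT B =====
-- literal port of Source B: recursion over the list of characters, each step consuming one
-- maximal run (the inner while loop = takeWhile/dropWhile on the tail); '(0+'*(k-1) is
-- Python string repetition, ported as flatten of replicate
def pvRepStr (s : List Char) (n : Nat) : List Char := (List.replicate n s).flatten

def pvBgo : List Char → List Char
  | [] => []
  | ch :: rest =>
    let k := (rest.takeWhile (· == ch)).length + 1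
    (if ch == '(' then pvRepStr ['(', '0', '+'] (k - 1) ++ ['(']
     else if ch == ')' then pvRepStr [')', '+', '0'] (k - 1) ++ [')']
     else List.replicate k ch) ++ pvBgo (rest.dropWhile (· == ch))
termination_by l => l.length
decreasing_by
  have := List.length_dropWhile_le (· == ch) rest
  simp; omega

def parse_double_brackets_alt (text : String) : String :=
  String.ofList (pvBgo text.toList)

-- ===== PRECONDITION & SPEC =====
def Spec_parse_double_brackets (text : String) (out : String) : Prop := out = parse_double_brackets_alt text
instance (text : String) (out : String) : Decidable (Spec_parse_double_brackets text out) := by unfold Spec_parse_double_brackets; infer_instance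

-- ===== CLAIM (what is proved, stated in full; the proofs are below) =====
def Claim_equal_parse_double_brackets : Prop := ∀ (text : String), Dom_parse_double_brackets text → Spec_parse_double_brackets text (parse_double_brackets text)

-- ===== LEMMAS AND PROOFS =====

-- common recursive characterisation: each char, plus the insertion decided by the next char
def pvExtra (a : Char) : Option Char → List Char
  | some b => if a == '(' && b == '(' then ['0', '+']
              else if a == ')' && b == ')' then ['+', '0'] else []
  | none => []

def pvG : List Char → List Char
  | [] => []
  | a :: rest => [a] ++ pvExtra a rest.head? ++ pvG rest

lemma pvGet_next (pre : List Char) (a : Char) (rest : List Char) :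
    PySem.List.pyGet? (pre ++ a :: rest) ((pre.length : Int) + 1) = rest.head? := by
  have h : ((pre.length : Int) + 1) = ((pre.length : Int) + (1 : Nat)) := by push_cast; ring
  rw [h, PySem.List.pyGet?_append_right]
  cases rest <;> simp

lemma pvStepA_eq (pre : List Char) (a : Char) (rest : List Char) (acc : List Char) :
    pvStepA (pre ++ a :: rest) acc ((pre.length : Int), a)
      = acc ++ [a] ++ pvExtra a rest.head? := by
  unfold pvStepA
  simp only [pvGet_next]
  cases hr : rest.head? with
  | none =>
    by_cases ha : a = '(' <;> by_cases ha' : a = ')' <;> simp [pvExtra, ha, ha']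
  | some b =>
    by_cases ha : a = '(' <;> by_cases ha' : a = ')' <;>
      by_cases hb : b = '(' <;> by_cases hb' : b = ')' <;>
        simp_all [pvExtra]

lemma pvFoldA (l : List Char) : ∀ (pre acc : List Char),
    (PySem.List.enumerate l (pre.length : Int)).foldl (pvStepA (pre ++ l)) acc
      = acc ++ pvG l := by
  induction l with
  | nil => intro pre acc; simp [PySem.List.enumerate_nil, pvG]
  | cons a rest ih =>
    intro pre acc
    rw [PySem.List.enumerate_cons, List.foldl_cons, pvStepA_eq]
    have hlen : ((pre.length : Int) + 1) = (((pre ++ [a]).length : Int)) := by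
      simp
    have hl : pre ++ a :: rest = (pre ++ [a]) ++ rest := by simp
    rw [hlen, hl, ih (pre ++ [a])]
    simp [pvG]

lemma pvA_eq_g (l : List Char) :
    (PySem.List.enumerate l 0).foldl (pvStepA l) [] = pvG l := by
  have := pvFoldA l [] []
  simpa using this

-- pvG over one maximal run of ch (m extra copies), d not starting with ch
lemma pvG_run (ch : Char) : ∀ (m : Nat) (d : List Char), d.head? ≠ some ch →
    pvG (ch :: (List.replicate m ch ++ d))
      = (if ch == '(' then pvRepStr ['(', '0', '+'] m ++ ['(']
         else if ch == ')' then pvRepStr [')', '+', '0'] m ++ [')']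
         else List.replicate (m + 1) ch) ++ pvG d := by
  intro m
  induction m with
  | zero =>
    intro d hd
    have hx : pvExtra ch d.head? = [] := by
      cases hh : d.head? with
      | none => simp [pvExtra]
      | some b =>
        have : b ≠ ch := by intro h; exact hd (by rw [hh, h])
        by_cases h1 : ch = '(' <;> by_cases h2 : ch = ')' <;>
          simp_all [pvExtra]
    by_cases h1 : ch = '(' <;> by_cases h2 : ch = ')' <;>
      simp_all [pvG, pvRepStr, pvExtra]
  | succ m ih =>
    intro d hd
    have : pvG (ch :: (List.replicate (m + 1) ch ++ d))
        = [ch] ++ pvExtra ch (some ch) ++ pvG (ch :: (List.replicate m ch ++ d)) := by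
      simp [pvG, List.replicate_succ]
    rw [this, ih d hd]
    by_cases h1 : ch = '(' <;> by_cases h2 : ch = ')' <;>
      simp_all [pvExtra, pvRepStr, List.replicate_succ]

lemma pvHead_dropWhile {p : Char → Bool} : ∀ (l : List Char) (x : Char),
    (l.dropWhile p).head? = some x → p x = false := by
  intro l
  induction l with
  | nil => intro x h; simp [List.dropWhile] at h
  | cons a rest ih =>
    intro x h
    by_cases hp : p a = true
    · rw [List.dropWhile_cons_of_pos hp] at h; exact ih x h
    · rw [List.dropWhile_cons_of_neg hp] at h
      simp at h; subst h; simpa using hp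

lemma pvBgo_eq_g : ∀ (l : List Char), pvBgo l = pvG l := by
  intro l
  induction hn : l.length using Nat.strong_induction_on generalizing l with
  | _ n ih =>
    match l with
    | [] => simp [pvBgo, pvG]
    | ch :: rest =>
      rw [pvBgo]
      have hsplit : rest = rest.takeWhile (· == ch) ++ rest.dropWhile (· == ch) :=
        (List.takeWhile_append_dropWhile).symm
      have htake : rest.takeWhile (· == ch)
          = List.replicate (rest.takeWhile (· == ch)).length ch := by
        apply List.eq_replicate_length.mpr
        intro b hb
        have := List.mem_takeWhile_imp hb
        simpa using this
      have hhd : (rest.dropWhile (· == ch)).head? ≠ some ch := by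
        intro h
        have := pvHead_dropWhile (p := (· == ch)) rest ch h
        simp at this
      have hlt : (rest.dropWhile (· == ch)).length < (ch :: rest).length := by
        have := List.length_dropWhile_le (· == ch) rest
        simp; omega
      have ihd := ih _ (hn ▸ hlt) _ rfl
      conv_rhs => rw [hsplit, htake]
      rw [pvG_run ch _ _ hhd, ← ihd]
      simp

-- ===== VERDICT (by name: the statement is the Claim_ definition above) =====
theorem parse_double_brackets_spec : Claim_equal_parse_double_brackets := by
  intro text _
  unfold Spec_parse_double_brackets parse_double_brackets parse_double_brackets_alt
  rw [pvA_eq_g, pvBgo_eq_g]
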